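-- pv_equiv track=rewrite | github.com/flegac/code-analyzer | src/code_analyzer/analyzer.py | enrich_graph_with_prefixes
-- ===== SOURCE A (Python) =====
-- from collections import defaultdict
--
-- def enrich_graph_with_prefixes(graph: list[str, list[str]], sub_module_length: int) -> dict[str, list[str]]:
--     enriched_graph: dict[str, list[str]] = defaultdict(list)
--     prefix_map: dict[str, list[str]] = defaultdict(list)  # prefix -> list of full modules
--
--     # Étape 1 : ajouter les préfixes comme sommets et relier les modules à leur préfixe
--     for mod in graph:
--         parts = mod.split('.')
--         if len(parts) >= sub_module_length:
--             prefix = '.'.join(parts[:sub_module_length])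
--             if prefix != mod:
--                 enriched_graph[prefix]  # assure que le sommet existe
--                 enriched_graph[mod].append(prefix)
--                 prefix_map[prefix].append(mod)
--
--     # Étape 2 : relier les préfixes entre eux si leurs enfants sont liés
--     for prefix_a, children_a in prefix_map.items():
--         for prefix_b, children_b in prefix_map.items():
--             if prefix_a == prefix_b:
--                 continue
--             # Vérifie s'il existe un lien entre un enfant de A et un enfant de B
--             for child_a in children_a:
--                 for child_b in children_b:
--                     if child_b in graph.get(child_a, []):
--                         enriched_graph[prefix_a].append(prefix_b)
--                         break
--                 else:
--                     continue
--                 break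
--
--     # Étape 3 : nettoyage des doublons et suppression des liens directs entre modules d'origine
--     final_graph = {}
--     for node, neighbors in enriched_graph.items():
--         # On ne garde que les liens vers des préfixes
--         filtered = [n for n in neighbors if n.count('.') == sub_module_length - 1]
--         final_graph[node] = sorted(set(filtered))
--
--     return final_graph
-- ===== SOURCE B (Python) =====
-- def enrich_graph_with_prefixes(graph, sub_module_length):
--     k = sub_module_length
--     mod2prefix = {}          # module -> its prefix (only for modules that get linked)
--     order = []               # node insertion order, same as A's enriched_graph
--     nbrs = {}                # node -> set of prefix neighbours
--     for mod in graph: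
--         parts = mod.split('.')
--         if len(parts) >= k:
--             prefix = '.'.join(parts[:k])
--             if prefix != mod:
--                 for node in (prefix, mod):
--                     if node not in nbrs:
--                         order.append(node)
--                         nbrs[node] = set()
--                 mod2prefix[mod] = prefix
--                 nbrs[mod].add(prefix)
--     # single pass over the edges: lift each module->module edge to prefix->prefix
--     for mod, targets in graph.items():
--         pa = mod2prefix.get(mod)
--         if pa is None:
--             continue
--         for t in targets:
--             pb = mod2prefix.get(t)
--             if pb is not None and pb != pa:
--                 nbrs[pa].add(pb)
--     keep = k - 1
--     return {node: sorted(n for n in nbrs[node] if n.count('.') == keep)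
--             for node in order}
-- ===== Notes on version B (the rewrite author's own statement) =====
-- stated objective: alternative
-- what changed: B builds a reverse module-to-prefix map once and lifts each module->module edge to a prefix->prefix edge in a single pass over the graph's adjacency lists, instead of A's all-pairs scan over prefix groups with nested child-by-child membership tests.
import Mathlib
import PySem

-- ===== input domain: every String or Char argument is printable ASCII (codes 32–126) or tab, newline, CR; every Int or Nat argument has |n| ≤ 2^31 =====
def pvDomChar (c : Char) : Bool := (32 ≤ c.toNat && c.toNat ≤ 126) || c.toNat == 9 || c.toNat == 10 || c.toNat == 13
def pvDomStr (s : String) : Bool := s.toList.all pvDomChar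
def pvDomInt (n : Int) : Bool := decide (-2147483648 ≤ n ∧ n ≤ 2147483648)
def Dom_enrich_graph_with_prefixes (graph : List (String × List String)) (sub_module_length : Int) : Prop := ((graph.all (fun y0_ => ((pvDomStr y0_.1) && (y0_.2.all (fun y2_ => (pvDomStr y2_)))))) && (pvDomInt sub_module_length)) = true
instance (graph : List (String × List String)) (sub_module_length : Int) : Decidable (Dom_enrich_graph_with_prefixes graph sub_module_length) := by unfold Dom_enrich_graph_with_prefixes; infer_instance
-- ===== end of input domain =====

-- B links prefixes via a reverse module→prefix map and a single pass over the edges instead of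
-- A's all-pairs scan over prefix groups (nested child×child membership tests); equivalence is
-- proved for every association list that represents a Python dict (distinct keys).

-- ===== PORT A =====
-- inner for/for/break/else of step 2: prefix_b is appended once iff some child of A links to
-- some child of B; `any` is exactly that first-hit search
def pvLinked (g : PySem.Dict String (List String)) (ca cb : List String) : Bool :=
  ca.any (fun a => cb.any (fun b => (g.getD a []).contains b))

def enrich_graph_with_prefixes (graph : List (String × List String)) (sub_module_length : Int) : List (String × List String) :=
  let g : PySem.Dict String (List String) := ⟨graph⟩
  -- step 1: for mod in graph — (enriched_graph, prefix_map); defaultdict touch = setdefault, append = modify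
  let st := graph.foldl (fun (st : PySem.Dict String (List String) × PySem.Dict String (List String)) kv =>
      let m := kv.1
      let parts := (PySem.Str.split? m ".").getD []      -- '.' ≠ '', so split? is always `some`
      if sub_module_length ≤ (parts.length : Int) then
        let pre := PySem.Str.join "." (PySem.List.slice parts none (some sub_module_length))
        if pre ≠ m then
          ((st.1.setdefault pre []).modify m [] (fun v => v ++ [pre]),
           st.2.modify pre [] (fun v => v ++ [m]))
        else st
      else st) (PySem.Dict.empty, PySem.Dict.empty)
  -- step 2: all pairs of prefix_map entries
  let eg := st.2.items.foldl (fun eg pa =>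
      st.2.items.foldl (fun eg pb =>
        if pa.1 == pb.1 then eg
        else if pvLinked g pa.2 pb.2 then eg.modify pa.1 [] (fun v => v ++ [pb.1]) else eg) eg) st.1
  -- step 3: final_graph
  (eg.items.foldl (fun (fin : PySem.Dict String (List String)) nv =>
      fin.insert nv.1 (PySem.List.sorted (PySem.Set.ofList
        (nv.2.filter (fun n => decide ((PySem.Str.count n "." : Int) = sub_module_length - 1))))
        (fun x => x) false)) PySem.Dict.empty).items

-- ===== PORT B =====
def enrich_graph_with_prefixes_alt (graph : List (String × List String)) (sub_module_length : Int) : List (String × List String) :=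
  -- first loop: mod2prefix, order, nbrs (PySem.Set values)
  let st := graph.foldl
    (fun (st : PySem.Dict String String × List String × PySem.Dict String (PySem.Set String)) kv =>
      let m := kv.1
      let parts := (PySem.Str.split? m ".").getD []      -- '.' ≠ '', so split? is always `some`
      if sub_module_length ≤ (parts.length : Int) then
        let pre := PySem.Str.join "." (PySem.List.slice parts none (some sub_module_length))
        if pre ≠ m then
          let on := [pre, m].foldl
            (fun (s : List String × PySem.Dict String (PySem.Set String)) node =>
              if s.2.contains node then s else (s.1 ++ [node], s.2.insert node PySem.Set.empty))
            (st.2.1, st.2.2)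
          (st.1.insert m pre, on.1, on.2.modify m PySem.Set.empty (fun s => PySem.Set.add s pre))
        else st
      else st) (PySem.Dict.empty, [], PySem.Dict.empty)
  let m2p := st.1
  -- single pass over the edges: lift each module->module edge to a prefix->prefix edge
  let nbrs := graph.foldl (fun nbrs kv =>
      match m2p.get? kv.1 with
      | none => nbrs
      | some pa => kv.2.foldl (fun nbrs t =>
          match m2p.get? t with
          | none => nbrs
          | some pb => if pb ≠ pa then nbrs.modify pa PySem.Set.empty (fun s => PySem.Set.add s pb) else nbrs)
          nbrs) st.2.2
  st.2.1.map (fun node => (node,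
    PySem.List.sorted ((nbrs.getD node PySem.Set.empty).filter
      (fun n => decide ((PySem.Str.count n "." : Int) = sub_module_length - 1))) (fun x => x) false))

-- ===== PRECONDITION & SPEC =====
-- Pre_ excludes association lists with duplicate keys: `graph` is a Python dict, which cannot
-- contain two equal keys, so such lists represent no dict input (first-match lookup vs the
-- dict's last-value-wins makes them ambiguous).
def Pre_enrich_graph_with_prefixes (graph : List (String × List String)) (sub_module_length : Int) : Prop :=
  (graph.map Prod.fst).Nodup
instance (graph : List (String × List String)) (sub_module_length : Int) : Decidable (Pre_enrich_graph_with_prefixes graph sub_module_length) := by unfold Pre_enrich_graph_with_prefixes; infer_instance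

def pvWitness_enrich_graph_with_prefixes : (List (String × List String)) × Int :=
  ([("a.b", ["c.d"]), ("c.d", ["a.b"]), ("x", [])], 1)

def Spec_enrich_graph_with_prefixes (graph : List (String × List String)) (sub_module_length : Int) (out : List (String × List String)) : Prop := out = enrich_graph_with_prefixes_alt graph sub_module_length
instance (graph : List (String × List String)) (sub_module_length : Int) (out : List (String × List String)) : Decidable (Spec_enrich_graph_with_prefixes graph sub_module_length out) := by unfold Spec_enrich_graph_with_prefixes; infer_instance

-- ===== CLAIM (what is proved, stated in full; the proofs are below) =====
def Claim_equal_enrich_graph_with_prefixes : Prop := ∀ (graph : List (String × List String)) (sub_module_length : Int), Dom_enrich_graph_with_prefixes graph sub_module_length → Pre_enrich_graph_with_prefixes graph sub_module_length → Spec_enrich_graph_with_prefixes graph sub_module_length (enrich_graph_with_prefixes graph sub_module_length)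

-- ===== LEMMAS AND PROOFS =====

-- named pieces of both ports (proof-side abbreviations)
def pvPre (k : Int) (m : String) : String :=
  PySem.Str.join "." (PySem.List.slice ((PySem.Str.split? m ".").getD []) none (some k))
def pvMapped (k : Int) (m : String) : Bool :=
  decide (k ≤ (((PySem.Str.split? m ".").getD []).length : Int)) && decide (pvPre k m ≠ m)
def pvMs (graph : List (String × List String)) (k : Int) : List String :=
  (graph.map Prod.fst).filter (pvMapped k)
def pvKeep (k : Int) (n : String) : Bool := decide ((PySem.Str.count n "." : Int) = k - 1)
def pvStepA (k : Int) (eg : PySem.Dict String (List String)) (m : String) : PySem.Dict String (List String) :=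
  (eg.setdefault (pvPre k m) []).modify m [] (fun v => v ++ [pvPre k m])
def pvStepP (k : Int) (pm : PySem.Dict String (List String)) (m : String) : PySem.Dict String (List String) :=
  pm.modify (pvPre k m) [] (fun v => v ++ [m])
def pvStepM (k : Int) (d : PySem.Dict String String) (m : String) : PySem.Dict String String :=
  d.insert m (pvPre k m)
def pvStepON (k : Int) (s : List String × PySem.Dict String (PySem.Set String)) (m : String) :
    List String × PySem.Dict String (PySem.Set String) :=
  let on := [pvPre k m, m].foldl
    (fun (s : List String × PySem.Dict String (PySem.Set String)) node =>
      if s.2.contains node then s else (s.1 ++ [node], s.2.insert node PySem.Set.empty)) s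
  (on.1, on.2.modify m PySem.Set.empty (fun s => PySem.Set.add s (pvPre k m)))

-- mid-level forms of the two ports, with phase 1 split into independent folds over pvMs
def pvAmid (graph : List (String × List String)) (k : Int) : List (String × List String) :=
  let eg1 := (pvMs graph k).foldl (pvStepA k) PySem.Dict.empty
  let pm := (pvMs graph k).foldl (pvStepP k) PySem.Dict.empty
  let eg2 := pm.items.foldl (fun eg pa =>
      pm.items.foldl (fun eg pb =>
        if pa.1 == pb.1 then eg
        else if pvLinked ⟨graph⟩ pa.2 pb.2 then eg.modify pa.1 [] (fun v => v ++ [pb.1]) else eg) eg) eg1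
  (eg2.items.foldl (fun (fin : PySem.Dict String (List String)) nv =>
      fin.insert nv.1 (PySem.List.sorted (PySem.Set.ofList (nv.2.filter (pvKeep k))) (fun x => x) false))
    PySem.Dict.empty).items

def pvBmid (graph : List (String × List String)) (k : Int) : List (String × List String) :=
  let m2p := (pvMs graph k).foldl (pvStepM k) PySem.Dict.empty
  let on := (pvMs graph k).foldl (pvStepON k) ([], PySem.Dict.empty)
  let nbrs := graph.foldl (fun nbrs kv =>
      match m2p.get? kv.1 with
      | none => nbrs
      | some pa => kv.2.foldl (fun nbrs t =>
          match m2p.get? t with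
          | none => nbrs
          | some pb => if pb ≠ pa then nbrs.modify pa PySem.Set.empty (fun s => PySem.Set.add s pb) else nbrs)
          nbrs) on.2
  on.1.map (fun node => (node,
    PySem.List.sorted ((nbrs.getD node PySem.Set.empty).filter (pvKeep k)) (fun x => x) false))

lemma phase1_A (graph : List (String × List String)) (k : Int) :
    graph.foldl (fun (st : PySem.Dict String (List String) × PySem.Dict String (List String)) kv =>
      let m := kv.1
      let parts := (PySem.Str.split? m ".").getD []
      if k ≤ (parts.length : Int) then
        let pre := PySem.Str.join "." (PySem.List.slice parts none (some k))
        if pre ≠ m then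
          ((st.1.setdefault pre []).modify m [] (fun v => v ++ [pre]),
           st.2.modify pre [] (fun v => v ++ [m]))
        else st
      else st) (PySem.Dict.empty, PySem.Dict.empty)
    = ((pvMs graph k).foldl (pvStepA k) PySem.Dict.empty,
       (pvMs graph k).foldl (pvStepP k) PySem.Dict.empty) := by
  rw [PySem.List.foldl_congr_mem _ _
      (fun st (kv : String × List String) =>
        if pvMapped k kv.1 then (pvStepA k st.1 kv.1, pvStepP k st.2 kv.1) else st) _ ?_]
  · rw [← List.foldl_map (f := Prod.fst)
        (g := fun st m => if pvMapped k m then (pvStepA k st.1 m, pvStepP k st.2 m) else st)]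
    rw [PySem.List.foldl_if_eq_foldl_filter (pvMapped k)
        (fun st m => (pvStepA k st.1 m, pvStepP k st.2 m))]
    rw [PySem.List.foldl_prod_mk (pvStepA k) (pvStepP k)]
    rfl
  · intro acc kv _
    simp only [pvMapped, pvStepA, pvStepP, pvPre, Bool.and_eq_true, decide_eq_true_eq]
    by_cases h1 : k ≤ ((((PySem.Str.split? kv.1 ".").getD []).length : Int))
    · by_cases h2 : PySem.Str.join "." (PySem.List.slice ((PySem.Str.split? kv.1 ".").getD []) none (some k)) ≠ kv.1
      · simp [h1, h2]
      · simp [h1, h2]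
    · simp [h1]

lemma A_eq_mid (graph : List (String × List String)) (k : Int) :
    enrich_graph_with_prefixes graph k = pvAmid graph k := by
  unfold enrich_graph_with_prefixes pvAmid
  simp only []
  rw [phase1_A graph k]
  rfl

lemma phase1_B (graph : List (String × List String)) (k : Int) :
    graph.foldl (fun (st : PySem.Dict String String × List String × PySem.Dict String (PySem.Set String)) kv =>
      let m := kv.1
      let parts := (PySem.Str.split? m ".").getD []
      if k ≤ (parts.length : Int) then
        let pre := PySem.Str.join "." (PySem.List.slice parts none (some k))
        if pre ≠ m then
          let on := [pre, m].foldl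
            (fun (s : List String × PySem.Dict String (PySem.Set String)) node =>
              if s.2.contains node then s else (s.1 ++ [node], s.2.insert node PySem.Set.empty))
            (st.2.1, st.2.2)
          (st.1.insert m pre, on.1, on.2.modify m PySem.Set.empty (fun s => PySem.Set.add s pre))
        else st
      else st) (PySem.Dict.empty, [], PySem.Dict.empty)
    = ((pvMs graph k).foldl (pvStepM k) PySem.Dict.empty,
       (pvMs graph k).foldl (pvStepON k) ([], PySem.Dict.empty)) := by
  rw [PySem.List.foldl_congr_mem _ _
      (fun (st : PySem.Dict String String × List String × PySem.Dict String (PySem.Set String))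
           (kv : String × List String) =>
        ((if pvMapped k kv.1 then pvStepM k st.1 kv.1 else st.1),
         (if pvMapped k kv.1 then pvStepON k st.2 kv.1 else st.2))) _ ?_]
  · rw [← List.foldl_map (f := Prod.fst)
        (g := fun (st : PySem.Dict String String × List String × PySem.Dict String (PySem.Set String)) m =>
          ((if pvMapped k m then pvStepM k st.1 m else st.1),
           (if pvMapped k m then pvStepON k st.2 m else st.2)))]
    rw [PySem.List.foldl_prod_mk (fun d m => if pvMapped k m then pvStepM k d m else d)
        (fun s m => if pvMapped k m then pvStepON k s m else s)]
    rw [PySem.List.foldl_if_eq_foldl_filter (pvMapped k) (pvStepM k)]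
    rw [PySem.List.foldl_if_eq_foldl_filter (pvMapped k) (pvStepON k)]
    rfl
  · intro acc kv _
    simp only [pvMapped, pvStepM, pvStepON, pvPre, Bool.and_eq_true, decide_eq_true_eq]
    by_cases h1 : k ≤ ((((PySem.Str.split? kv.1 ".").getD []).length : Int))
    · by_cases h2 : PySem.Str.join "." (PySem.List.slice ((PySem.Str.split? kv.1 ".").getD []) none (some k)) ≠ kv.1
      · simp [h1, h2]
      · simp [h1, h2]
    · simp [h1]

lemma B_eq_mid (graph : List (String × List String)) (k : Int) :
    enrich_graph_with_prefixes_alt graph k = pvBmid graph k := by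
  unfold enrich_graph_with_prefixes_alt pvBmid
  simp only []
  rw [phase1_B graph k]
  rfl

-- a list with distinct first components determines members by their key
lemma pv_key_inj {α : Type} {l : List (String × α)} (hnd : (l.map Prod.fst).Nodup)
    {p q : String × α} (hp : p ∈ l) (hq : q ∈ l) (h : p.1 = q.1) : p = q := by
  induction l with
  | nil => cases hp
  | cons a t ih =>
    simp only [List.map_cons, List.nodup_cons] at hnd
    rcases List.mem_cons.mp hp with rfl | hp'
    · rcases List.mem_cons.mp hq with rfl | hq'
      · rfl
      · exact absurd (h ▸ List.mem_map_of_mem (f := Prod.fst) hq') hnd.1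
    · rcases List.mem_cons.mp hq with rfl | hq'
      · exact absurd (h ▸ List.mem_map_of_mem (f := Prod.fst) hp') hnd.1
      · exact ih hnd.2 hp' hq'

lemma pv_mem_items_of_get? {ν : Type} {d : PySem.Dict String ν} {c : String} {v : ν}
    (h : d.get? c = some v) : (c, v) ∈ d.items := by
  simp only [PySem.Dict.get?, Option.map_eq_some_iff] at h
  obtain ⟨q, hq, hv⟩ := h
  have hmem := List.mem_of_find?_eq_some hq
  have hkey : q.1 = c := by
    have := List.find?_some hq
    simpa using this
  have : q = (c, v) := by
    cases q; simp_all
  exact this ▸ hmem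

lemma pv_insert_self {ν : Type} {d : PySem.Dict String ν} {c : String} {v : ν}
    (hnd : d.keys.Nodup) (h : d.get? c = some v) : d.insert c v = d := by
  have hc : d.contains c = true := by
    rcases hcon : d.contains c with _ | _
    · rw [← PySem.Dict.get?_eq_none_iff_contains] at hcon; simp [hcon] at h
    · rfl
  apply PySem.Dict.ext
  rw [PySem.Dict.items_insert_of_contains d v hc]
  have hm : (c, v) ∈ d.items := pv_mem_items_of_get? h
  calc List.map (fun p => if (p.1 == c) = true then (c, v) else p) d.items
      = List.map id d.items := by
        apply List.map_congr_left
        intro p hp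
        by_cases hpc : p.1 = c
        · have : p = (c, v) := pv_key_inj hnd hp hm (by simp [hpc])
          simp [this]
        · simp [hpc]
    _ = d.items := List.map_id _

-- one step of phase 1: B's (order, nbrs) update is A's enriched_graph update with its key list
lemma stepON_eq (k : Int) (m : String) (eg : PySem.Dict String (List String))
    (hm : eg.get? m = none ∨ eg.get? m = some []) :
    pvStepON k (eg.keys, eg) m = ((pvStepA k eg m).keys, pvStepA k eg m) := by
  have hse : (PySem.Set.empty : PySem.Set String) = ([] : List String) := rfl
  have hd1m : ∀ (p : String), (eg.setdefault p []).get? m = none ∨ (eg.setdefault p []).get? m = some [] := by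
    intro p
    by_cases hmp : m = p
    · subst hmp
      rw [PySem.Dict.get?_setdefault_self]
      rcases hm with h | h <;> simp [h]
    · rw [PySem.Dict.get?_setdefault_of_ne _ _ hmp]
      exact hm
  unfold pvStepON pvStepA
  simp only [List.foldl_cons, List.foldl_nil]
  generalize hpdef : pvPre k m = p
  rw [hpdef] at *
  have hfold1 : (if eg.contains p then ((eg.keys, eg) : List String × PySem.Dict String (PySem.Set String))
        else (eg.keys ++ [p], eg.insert p PySem.Set.empty))
      = ((eg.setdefault p []).keys, eg.setdefault p []) := by
    by_cases hc1 : eg.contains p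
    · rw [PySem.Dict.setdefault_of_contains _ _ hc1]
      simp [hc1]
    · simp only [Bool.not_eq_true] at hc1
      rw [PySem.Dict.setdefault_of_not_contains _ _ hc1]
      rw [PySem.Dict.keys_insert_of_not_contains _ _ hc1]
      simp [hc1]
  simp only [hfold1]
  have hgd : (eg.setdefault p []).getD m [] = [] := by
    rw [PySem.Dict.getD_eq_get?_getD]
    rcases hd1m p with h | h <;> simp [h]
  have hadd : PySem.Set.add ([] : PySem.Set String) p = [] ++ [p] := rfl
  by_cases hc2 : (eg.setdefault p []).contains m
  · simp only [hc2, if_true]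
    unfold PySem.Dict.modify
    simp only [hgd, hse, hadd]
    refine Prod.ext ?_ rfl
    exact (PySem.Dict.keys_insert_of_contains _ _ hc2).symm
  · simp only [Bool.not_eq_true] at hc2
    simp only [hc2, Bool.false_eq_true, if_false]
    unfold PySem.Dict.modify
    simp only [hgd, hse, PySem.Dict.getD_insert_self, hadd,
      PySem.Dict.insert_insert_self]
    refine Prod.ext ?_ rfl
    exact (PySem.Dict.keys_insert_of_not_contains _ _ hc2).symm

lemma sim1 (k : Int) : ∀ (l : List String) (eg : PySem.Dict String (List String)),
    l.Nodup → (∀ m ∈ l, eg.get? m = none ∨ eg.get? m = some []) →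
    l.foldl (pvStepON k) (eg.keys, eg) = ((l.foldl (pvStepA k) eg).keys, l.foldl (pvStepA k) eg) := by
  intro l
  induction l with
  | nil => intro eg _ _; rfl
  | cons m t ih =>
    intro eg hnd hrest
    have hm := hrest m (List.mem_cons_self ..)
    simp only [List.foldl_cons, stepON_eq k m eg hm]
    apply ih
    · exact (List.nodup_cons.mp hnd).2
    · intro x hx
      have hxm : x ≠ m := by
        rintro rfl; exact (List.nodup_cons.mp hnd).1 hx
      have hx0 := hrest x (List.mem_cons_of_mem _ hx)
      unfold pvStepA PySem.Dict.modify
      rw [PySem.Dict.get?_insert _ _ _ _]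
      rw [if_neg hxm]
      by_cases hxp : x = pvPre k m
      · subst hxp
        rw [PySem.Dict.get?_setdefault_self]
        rcases hx0 with h0 | h0 <;> simp [h0]
      · rw [PySem.Dict.get?_setdefault_of_ne _ _ hxp]
        exact hx0

lemma stepA_get?_self (k : Int) (eg : PySem.Dict String (List String)) (m : String)
    (hm : eg.get? m = none ∨ eg.get? m = some []) :
    (pvStepA k eg m).get? m = some [pvPre k m] := by
  have hgd : (eg.setdefault (pvPre k m) []).getD m [] = [] := by
    rw [PySem.Dict.getD_eq_get?_getD]
    by_cases hmp : m = pvPre k m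
    · rw [← hmp, PySem.Dict.get?_setdefault_self]
      rcases hm with h | h <;> simp [h]
    · rw [PySem.Dict.get?_setdefault_of_ne _ _ hmp]
      rcases hm with h | h <;> simp [h]
  unfold pvStepA PySem.Dict.modify
  rw [hgd, PySem.Dict.get?_insert_self]
  rfl

lemma stepA_get?_ne (k : Int) (eg : PySem.Dict String (List String)) (m x : String)
    (hx : x ≠ m) :
    (pvStepA k eg m).get? x =
      if x = pvPre k m then some ((eg.get? x).getD []) else eg.get? x := by
  unfold pvStepA PySem.Dict.modify
  rw [PySem.Dict.get?_insert, if_neg hx]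
  by_cases hxp : x = pvPre k m
  · rw [if_pos hxp, hxp, PySem.Dict.get?_setdefault_self]
  · rw [if_neg hxp, PySem.Dict.get?_setdefault_of_ne _ _ hxp]

lemma foldA_get? (k : Int) : ∀ (l : List String) (eg : PySem.Dict String (List String)),
    l.Nodup → (∀ m ∈ l, eg.get? m = none ∨ eg.get? m = some []) → ∀ x,
    (l.foldl (pvStepA k) eg).get? x =
      if x ∈ l then some [pvPre k x]
      else if x ∈ l.map (pvPre k) ∧ eg.get? x = none then some []
      else eg.get? x := by
  intro l
  induction l with
  | nil => intro eg _ _ x; simp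
  | cons m t ih =>
    intro eg hnd hrest x
    have hm := hrest m (List.mem_cons_self ..)
    have hrest' : ∀ y ∈ t, (pvStepA k eg m).get? y = none ∨ (pvStepA k eg m).get? y = some [] := by
      intro y hy
      have hym : y ≠ m := by rintro rfl; exact (List.nodup_cons.mp hnd).1 hy
      rw [stepA_get?_ne k eg m y hym]
      by_cases hyp : y = pvPre k m
      · rw [if_pos hyp]
        rcases hrest y (List.mem_cons_of_mem _ hy) with h | h <;> simp [h]
      · rw [if_neg hyp]
        exact hrest y (List.mem_cons_of_mem _ hy)
    simp only [List.foldl_cons]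
    rw [ih (pvStepA k eg m) (List.nodup_cons.mp hnd).2 hrest' x]
    by_cases hxt : x ∈ t
    · simp [hxt]
    · by_cases hxm : x = m
      · subst hxm
        have hsome := stepA_get?_self k eg x hm
        simp [hxt, hsome]
      · have hne := stepA_get?_ne k eg m x hxm
        by_cases hxp : x = pvPre k m
        · rw [if_pos hxp] at hne
          have hLcond : ¬(x ∈ t.map (pvPre k) ∧ (pvStepA k eg m).get? x = none) := by
            simp [hne]
          rw [if_neg (by simp [hxt, hxm] : ¬x ∈ m :: t),
              if_neg hxt, if_neg hLcond, hne]
          rcases hg : eg.get? x with _ | v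
          · rw [if_pos ⟨by simp [hxp], rfl⟩]
            simp
          · rw [if_neg (by simp)]
            rfl
        · rw [if_neg hxp] at hne
          rw [if_neg (by simp [hxt, hxm] : ¬x ∈ m :: t), if_neg hxt, hne]
          have hiff : (x ∈ (m::t).map (pvPre k)) ↔ x ∈ t.map (pvPre k) := by
            simp [hxp]
          by_cases hc : x ∈ t.map (pvPre k) ∧ eg.get? x = none
          · rw [if_pos hc, if_pos ⟨hiff.mpr hc.1, hc.2⟩]
          · rw [if_neg hc, if_neg (fun h => hc ⟨hiff.mp h.1, h.2⟩)]

lemma stepA_keys_nodup (k : Int) (eg : PySem.Dict String (List String)) (m : String)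
    (h : eg.keys.Nodup) : (pvStepA k eg m).keys.Nodup := by
  unfold pvStepA PySem.Dict.modify
  apply PySem.Dict.nodup_keys_insert
  by_cases hc : eg.contains (pvPre k m)
  · rw [PySem.Dict.setdefault_of_contains _ _ hc]; exact h
  · simp only [Bool.not_eq_true] at hc
    rw [PySem.Dict.setdefault_of_not_contains _ _ hc]
    exact PySem.Dict.nodup_keys_insert _ _ _ h

lemma foldA_keys_nodup (k : Int) : ∀ (l : List String) (eg : PySem.Dict String (List String)),
    eg.keys.Nodup → (l.foldl (pvStepA k) eg).keys.Nodup := by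
  intro l
  induction l with
  | nil => intro eg h; exact h
  | cons m t ih => intro eg h; exact ih _ (stepA_keys_nodup k eg m h)

lemma foldM_get? (k : Int) : ∀ (l : List String) (d : PySem.Dict String String) (x : String),
    (l.foldl (pvStepM k) d).get? x = if x ∈ l then some (pvPre k x) else d.get? x := by
  intro l
  induction l with
  | nil => intro d x; simp
  | cons m t ih =>
    intro d x
    simp only [List.foldl_cons, ih]
    unfold pvStepM
    by_cases hxt : x ∈ t
    · simp [hxt]
    · rw [PySem.Dict.get?_insert]
      by_cases hxm : x = m
      · subst hxm; simp [hxt]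
      · simp [hxt, hxm]

lemma foldP_eq_pairs (k : Int) (l : List String) (d : PySem.Dict String (List String)) :
    l.foldl (pvStepP k) d
      = (l.map (fun m => (pvPre k m, m))).foldl (fun d p => d.modify p.1 [] (fun v => v ++ [p.2])) d := by
  rw [List.foldl_map]; rfl

lemma foldP_getD (k : Int) (l : List String) (d : PySem.Dict String (List String)) (c : String) :
    (l.foldl (pvStepP k) d).getD c [] = d.getD c [] ++ l.filter (fun m => pvPre k m == c) := by
  rw [foldP_eq_pairs, PySem.Dict.getD_foldl_modify_append]
  congr 1
  rw [List.filter_map]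
  rw [List.map_map]
  have h1 : ((fun (x : String × String) => x.2) ∘ fun m => (pvPre k m, m)) = id := rfl
  have h2 : ((fun (p : String × String) => p.1 == c) ∘ fun m => (pvPre k m, m))
      = fun m => pvPre k m == c := rfl
  rw [h1, h2, List.map_id]

lemma foldP_keys (k : Int) (l : List String) :
    (l.foldl (pvStepP k) PySem.Dict.empty).keys = PySem.Set.ofList (l.map (pvPre k)) := by
  have h := PySem.Dict.keys_foldl_modify_key l (pvPre k) ([] : List String)
    (fun _ m v => v ++ [m]) PySem.Dict.empty
  rw [PySem.Dict.keys_empty] at h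
  rw [show (fun (d : PySem.Dict String (List String)) m => d.modify (pvPre k m) [] (fun v => v ++ [m]))
        = pvStepP k from rfl] at h
  rw [h, PySem.Set.update_nil_left]

lemma foldP_keys_nodup (k : Int) (l : List String) :
    (l.foldl (pvStepP k) PySem.Dict.empty).keys.Nodup := by
  rw [foldP_keys]
  exact PySem.Set.nodup_ofList _

lemma innerA (g : PySem.Dict String (List String)) (ca : List String) (c : String) :
    ∀ (l : List (String × List String)) (eg : PySem.Dict String (List String)),
    eg.keys.Nodup → eg.contains c = true →
    l.foldl (fun eg pb => if c == pb.1 then eg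
        else if pvLinked g ca pb.2 then eg.modify c [] (fun v => v ++ [pb.1]) else eg) eg
    = eg.modify c [] (fun v => v ++ (l.filter (fun pb => !(c == pb.1) && pvLinked g ca pb.2)).map Prod.fst) := by
  intro l
  induction l with
  | nil =>
    intro eg hnd hc
    obtain ⟨v, hv⟩ : ∃ v, eg.get? c = some v := by
      rcases hg : eg.get? c with _ | v
      · rw [PySem.Dict.get?_eq_none_iff_contains] at hg; rw [hc] at hg; cases hg
      · exact ⟨v, rfl⟩
    simp only [List.foldl_nil, List.filter_nil, List.map_nil, List.append_nil]
    unfold PySem.Dict.modify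
    rw [PySem.Dict.getD_eq_get?_getD, hv]
    exact (pv_insert_self hnd hv).symm
  | cons pb l ih =>
    intro eg hnd hc
    simp only [List.foldl_cons, List.filter_cons]
    by_cases h1 : c = pb.1
    · have hb : (c == pb.1) = true := by simp [h1]
      simp only [hb, if_true, Bool.not_true, Bool.false_and, Bool.false_eq_true, if_false]
      exact ih eg hnd hc
    · have h1b : (c == pb.1) = false := by simp [h1]
      simp only [h1b, Bool.false_eq_true, if_false, Bool.not_false, Bool.true_and]
      by_cases h2 : pvLinked g ca pb.2
      · simp only [h2, if_true]
        have hnd' : (eg.modify c [] (fun v => v ++ [pb.1])).keys.Nodup := by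
          unfold PySem.Dict.modify; exact PySem.Dict.nodup_keys_insert _ _ _ hnd
        have hc' : (eg.modify c [] (fun v => v ++ [pb.1])).contains c = true := by
          unfold PySem.Dict.modify; exact PySem.Dict.contains_insert_self _ _ _
        rw [ih _ hnd' hc']
        unfold PySem.Dict.modify
        rw [PySem.Dict.getD_insert_self, PySem.Dict.insert_insert_self]
        simp only [List.map_cons, List.append_assoc, List.cons_append, List.nil_append]
      · simp only [h2, Bool.false_eq_true, if_false]
        exact ih eg hnd hc

lemma outerA (g : PySem.Dict String (List String)) (its : List (String × List String)) :
    ∀ (l : List (String × List String)) (eg : PySem.Dict String (List String)),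
    eg.keys.Nodup → (∀ pa ∈ l, eg.contains pa.1 = true) →
    (l.foldl (fun eg pa => its.foldl (fun eg pb => if pa.1 == pb.1 then eg
        else if pvLinked g pa.2 pb.2 then eg.modify pa.1 [] (fun v => v ++ [pb.1]) else eg) eg) eg).keys
      = eg.keys ∧
    ∀ x, (l.foldl (fun eg pa => its.foldl (fun eg pb => if pa.1 == pb.1 then eg
        else if pvLinked g pa.2 pb.2 then eg.modify pa.1 [] (fun v => v ++ [pb.1]) else eg) eg) eg).getD x []
      = eg.getD x [] ++ (l.filter (fun pa => pa.1 == x)).flatMap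
          (fun pa => (its.filter (fun pb => !(pa.1 == pb.1) && pvLinked g pa.2 pb.2)).map Prod.fst) := by
  intro l
  induction l with
  | nil => intro eg hnd hc; exact ⟨rfl, fun x => by simp⟩
  | cons pa l ih =>
    intro eg hnd hc
    simp only [List.foldl_cons]
    rw [innerA g pa.2 pa.1 its eg hnd (hc pa (List.mem_cons_self ..))]
    have hkeys' : (eg.modify pa.1 [] (fun v => v ++ (its.filter (fun pb => !(pa.1 == pb.1) && pvLinked g pa.2 pb.2)).map Prod.fst)).keys = eg.keys := by
      rw [PySem.Dict.keys_modify]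
      exact PySem.Dict.keys_insert_of_contains _ _ (hc pa (List.mem_cons_self ..))
    have hnd' : (eg.modify pa.1 [] (fun v => v ++ (its.filter (fun pb => !(pa.1 == pb.1) && pvLinked g pa.2 pb.2)).map Prod.fst)).keys.Nodup := by
      rw [hkeys']; exact hnd
    have hc' : ∀ pb ∈ l, (eg.modify pa.1 [] (fun v => v ++ (its.filter (fun pb => !(pa.1 == pb.1) && pvLinked g pa.2 pb.2)).map Prod.fst)).contains pb.1 = true := by
      intro pb hpb
      rw [PySem.Dict.contains_iff_mem_keys, hkeys', ← PySem.Dict.contains_iff_mem_keys]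
      exact hc pb (List.mem_cons_of_mem _ hpb)
    obtain ⟨ihk, ihv⟩ := ih _ hnd' hc'
    refine ⟨by rw [ihk, hkeys'], ?_⟩
    intro x
    rw [ihv x]
    rw [PySem.Dict.getD_modify]
    simp only [List.filter_cons]
    by_cases hx : pa.1 = x
    · have hxb : (pa.1 == x) = true := by simp [hx]
      simp only [hxb, if_true, List.flatMap_cons]
      rw [if_pos hx.symm, hx, List.append_assoc]
    · have hxb : (pa.1 == x) = false := by simp [hx]
      rw [if_neg ((fun h => hx h.symm) : ¬ x = pa.1)]
      simp only [hxb, Bool.false_eq_true, if_false]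

lemma innerB_mem (m2p : PySem.Dict String String) (pa : String) :
    ∀ (ts : List String) (n : PySem.Dict String (PySem.Set String)) (x y : String),
    y ∈ (ts.foldl (fun nbrs t => match m2p.get? t with
        | none => nbrs
        | some pb => if pb ≠ pa then nbrs.modify pa PySem.Set.empty (fun s => PySem.Set.add s pb) else nbrs) n).getD x PySem.Set.empty
    ↔ y ∈ n.getD x PySem.Set.empty ∨ (x = pa ∧ ∃ t ∈ ts, m2p.get? t = some y ∧ y ≠ pa) := by
  intro ts
  induction ts with
  | nil => intro n x y; simp
  | cons t ts ih =>
    intro n x y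
    simp only [List.foldl_cons]
    rcases ht : m2p.get? t with _ | pb
    · simp only [ht]
      rw [ih]
      simp [ht]
    · simp only [ht]
      by_cases hpb : pb = pa
      · rw [if_neg (not_not_intro hpb), ih]
        simp only [List.exists_mem_cons_iff, ht, hpb, Option.some_inj]
        have hns : ¬(pa = y ∧ ¬ y = pa) := fun h => h.2 h.1.symm
        tauto
      · rw [if_pos hpb, ih]
        rw [PySem.Dict.getD_modify]
        by_cases hx : x = pa
        · rw [if_pos hx]
          subst hx
          simp only [PySem.Set.mem_add, List.exists_mem_cons_iff, ht, Option.some_inj]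
          have h1 : y = pb ↔ pb = y ∧ y ≠ x := by
            constructor
            · rintro rfl; exact ⟨rfl, hpb⟩
            · rintro ⟨rfl, -⟩; rfl
          rw [h1]
          tauto
        · rw [if_neg hx]
          simp [ht, hx]

lemma innerB_nodup (m2p : PySem.Dict String String) (pa : String) :
    ∀ (ts : List String) (n : PySem.Dict String (PySem.Set String)),
    (∀ x, (n.getD x PySem.Set.empty).Nodup) → ∀ x,
    ((ts.foldl (fun nbrs t => match m2p.get? t with
        | none => nbrs
        | some pb => if pb ≠ pa then nbrs.modify pa PySem.Set.empty (fun s => PySem.Set.add s pb) else nbrs) n).getD x PySem.Set.empty).Nodup := by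
  intro ts
  induction ts with
  | nil => intro n h x; exact h x
  | cons t ts ih =>
    intro n h x
    simp only [List.foldl_cons]
    rcases ht : m2p.get? t with _ | pb
    · simp only [ht]; exact ih n h x
    · simp only [ht]
      by_cases hpb : pb = pa
      · rw [if_neg (not_not_intro hpb)]; exact ih n h x
      · rw [if_pos hpb]
        apply ih
        intro z
        rw [PySem.Dict.getD_modify]
        by_cases hz : z = pa
        · rw [if_pos hz]; exact PySem.Set.nodup_add _ _ (h pa)
        · rw [if_neg hz]; exact h z

lemma outerB_mem (m2p : PySem.Dict String String) :
    ∀ (gl : List (String × List String)) (n : PySem.Dict String (PySem.Set String)) (x y : String),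
    y ∈ (gl.foldl (fun nbrs kv => match m2p.get? kv.1 with
        | none => nbrs
        | some pa => kv.2.foldl (fun nbrs t => match m2p.get? t with
            | none => nbrs
            | some pb => if pb ≠ pa then nbrs.modify pa PySem.Set.empty (fun s => PySem.Set.add s pb) else nbrs) nbrs) n).getD x PySem.Set.empty
    ↔ y ∈ n.getD x PySem.Set.empty ∨
      ∃ kv ∈ gl, m2p.get? kv.1 = some x ∧ ∃ t ∈ kv.2, m2p.get? t = some y ∧ y ≠ x := by
  intro gl
  induction gl with
  | nil => intro n x y; simp
  | cons kv gl ih =>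
    intro n x y
    simp only [List.foldl_cons]
    rcases ha : m2p.get? kv.1 with _ | pa
    · simp only [ha]
      rw [ih]
      simp [ha]
    · simp only [ha]
      rw [ih, innerB_mem m2p pa kv.2 n x y]
      simp only [List.exists_mem_cons_iff, ha, Option.some_inj]
      constructor
      · rintro ((h | ⟨rfl, h⟩) | h)
        · exact Or.inl h
        · exact Or.inr (Or.inl ⟨rfl, h⟩)
        · exact Or.inr (Or.inr h)
      · rintro (h | ⟨heq, h⟩ | h)
        · exact Or.inl (Or.inl h)
        · cases heq; exact Or.inl (Or.inr ⟨rfl, h⟩)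
        · exact Or.inr h

lemma outerB_nodup (m2p : PySem.Dict String String) :
    ∀ (gl : List (String × List String)) (n : PySem.Dict String (PySem.Set String)),
    (∀ x, (n.getD x PySem.Set.empty).Nodup) → ∀ x,
    ((gl.foldl (fun nbrs kv => match m2p.get? kv.1 with
        | none => nbrs
        | some pa => kv.2.foldl (fun nbrs t => match m2p.get? t with
            | none => nbrs
            | some pb => if pb ≠ pa then nbrs.modify pa PySem.Set.empty (fun s => PySem.Set.add s pb) else nbrs) nbrs) n).getD x PySem.Set.empty).Nodup := by
  intro gl
  induction gl with
  | nil => intro n h x; exact h x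
  | cons kv gl ih =>
    intro n h x
    simp only [List.foldl_cons]
    rcases ha : m2p.get? kv.1 with _ | pa
    · simp only [ha]; exact ih n h x
    · simp only [ha]
      exact ih _ (innerB_nodup m2p pa kv.2 n h) x

lemma mid_eq (graph : List (String × List String)) (k : Int)
    (h : (graph.map Prod.fst).Nodup) : pvAmid graph k = pvBmid graph k := by
  have hse : (PySem.Set.empty : PySem.Set String) = ([] : List String) := rfl
  unfold pvAmid pvBmid
  simp only []
  set ms := pvMs graph k with hms
  have hmsnd : ms.Nodup := h.filter _
  have hrest0 : ∀ m ∈ ms, (PySem.Dict.empty : PySem.Dict String (List String)).get? m = none ∨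
      (PySem.Dict.empty : PySem.Dict String (List String)).get? m = some [] :=
    fun m _ => Or.inl (PySem.Dict.get?_empty m)
  have hsim := sim1 k ms PySem.Dict.empty hmsnd hrest0
  rw [PySem.Dict.keys_empty] at hsim
  rw [hsim]
  set eg1 := ms.foldl (pvStepA k) PySem.Dict.empty with heg1
  set pm := ms.foldl (pvStepP k) PySem.Dict.empty with hpm
  set m2p := ms.foldl (pvStepM k) PySem.Dict.empty with hm2p
  -- eg1 characterization
  have heg1get : ∀ x, eg1.get? x =
      if x ∈ ms then some [pvPre k x] else if x ∈ ms.map (pvPre k) then some [] else none := by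
    intro x
    rw [heg1, foldA_get? k ms _ hmsnd hrest0 x]
    by_cases h1 : x ∈ ms
    · simp [h1]
    · by_cases h2 : x ∈ ms.map (pvPre k)
      · simp [h1, h2, PySem.Dict.get?_empty]
      · simp [h1, h2, PySem.Dict.get?_empty]
  have heg1nd : eg1.keys.Nodup := by
    rw [heg1]
    exact foldA_keys_nodup k ms _ (by rw [PySem.Dict.keys_empty]; exact List.nodup_nil)
  have heg1getD : ∀ x, eg1.getD x [] = if x ∈ ms then [pvPre k x] else [] := by
    intro x
    rw [PySem.Dict.getD_eq_get?_getD, heg1get x]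
    by_cases h1 : x ∈ ms
    · simp [h1]
    · by_cases h2 : x ∈ ms.map (pvPre k) <;> simp [h1, h2]
  have heg1vnd : ∀ x, (eg1.getD x []).Nodup := by
    intro x
    rw [heg1getD x]
    by_cases h1 : x ∈ ms <;> simp [h1]
  have heg1contains : ∀ x, eg1.contains x = true ↔ (x ∈ ms ∨ x ∈ ms.map (pvPre k)) := by
    intro x
    constructor
    · intro hc
      by_contra hn
      rw [not_or] at hn
      have := heg1get x
      rw [if_neg hn.1, if_neg hn.2] at this
      rw [PySem.Dict.get?_eq_none_iff_contains] at this
      rw [hc] at this; cases this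
    · intro hc
      rcases h0 : eg1.contains x with _ | _
      · exfalso
        rw [← PySem.Dict.get?_eq_none_iff_contains] at h0
        rw [heg1get x] at h0
        rcases hc with h1 | h1
        · rw [if_pos h1] at h0; cases h0
        · by_cases h2 : x ∈ ms
          · rw [if_pos h2] at h0; cases h0
          · rw [if_neg h2, if_pos h1] at h0; cases h0
      · rfl
  -- pm characterization
  have hpmgetD : ∀ c, pm.getD c [] = ms.filter (fun m => pvPre k m == c) := by
    intro c
    rw [hpm, foldP_getD]
    rw [PySem.Dict.getD_eq_get?_getD, PySem.Dict.get?_empty]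
    rfl
  have hpmkeys : pm.keys = PySem.Set.ofList (ms.map (pvPre k)) := by
    rw [hpm]; exact foldP_keys k ms
  have hpmknd : pm.keys.Nodup := by rw [hpm]; exact foldP_keys_nodup k ms
  have hpmitems : pm.items = pm.keys.map (fun c => (c, pm.getD c [])) :=
    PySem.Dict.items_eq_map_keys pm hpmknd []
  -- m2p characterization
  have hm2pget : ∀ x, m2p.get? x = if x ∈ ms then some (pvPre k x) else none := by
    intro x
    rw [hm2p, foldM_get? k ms _ x, PySem.Dict.get?_empty]
  have hm2psome : ∀ x y, m2p.get? x = some y ↔ (x ∈ ms ∧ y = pvPre k x) := by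
    intro x y
    rw [hm2pget x]
    by_cases h1 : x ∈ ms
    · simp [h1, eq_comm]
    · simp [h1]
  -- graph as dict
  have hgget : ∀ kv ∈ graph, (PySem.Dict.mk graph).get? kv.1 = some kv.2 := by
    intro kv hkv
    exact PySem.Dict.get?_of_mem_items _ (by exact hkv) h
  have hmskeys : ∀ m ∈ ms, ∃ kv ∈ graph, kv.1 = m := by
    intro m hm
    have : m ∈ graph.map Prod.fst := List.mem_of_mem_filter hm
    obtain ⟨kv, hkv, hkv1⟩ := List.mem_map.mp this
    exact ⟨kv, hkv, hkv1⟩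
  -- phase 2 on A
  have hcont : ∀ pa ∈ pm.items, eg1.contains pa.1 = true := by
    intro pa hpa
    have : pa.1 ∈ pm.keys := by
      rw [show pm.keys = pm.items.map Prod.fst from rfl]
      exact List.mem_map_of_mem hpa
    rw [hpmkeys] at this
    exact (heg1contains pa.1).mpr (Or.inr ((PySem.Set.mem_ofList _ _).mp this))
  obtain ⟨hAkeys, hAgetD⟩ := outerA (PySem.Dict.mk graph) pm.items pm.items eg1 heg1nd hcont
  -- phase 2 on B
  have hBmem := outerB_mem m2p graph eg1
  have hBnodup := outerB_nodup m2p graph eg1 (by intro x; rw [hse]; exact heg1vnd x)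
  -- the crux: same neighbour sets
  have hcrux : ∀ c y,
      (y ∈ (pm.items.filter (fun pa => pa.1 == c)).flatMap
        (fun pa => (pm.items.filter (fun pb => !(pa.1 == pb.1) && pvLinked (PySem.Dict.mk graph) pa.2 pb.2)).map Prod.fst))
      ↔ ∃ kv ∈ graph, m2p.get? kv.1 = some c ∧ ∃ t ∈ kv.2, m2p.get? t = some y ∧ y ≠ c := by
    intro c y
    rw [List.mem_flatMap]
    constructor
    · rintro ⟨pa, hpa, hy⟩
      obtain ⟨hpam, hpa1⟩ := List.mem_filter.mp hpa
      have hpa1' : pa.1 = c := by simpa using hpa1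
      obtain ⟨pb, hpb, hpb1⟩ := List.mem_map.mp hy
      obtain ⟨hpbm, hpbc⟩ := List.mem_filter.mp hpb
      rw [Bool.and_eq_true] at hpbc
      obtain ⟨hne, hlink⟩ := hpbc
      have hnecy : pa.1 ≠ pb.1 := by
        intro hq; rw [hq] at hne; simp at hne
      -- unpack pvLinked
      unfold pvLinked at hlink
      rw [List.any_eq_true] at hlink
      obtain ⟨ca, hca, hca2⟩ := hlink
      rw [List.any_eq_true] at hca2
      obtain ⟨cb, hcb, hcb2⟩ := hca2
      -- pa, pb are pm items
      rw [hpmitems] at hpam hpbm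
      obtain ⟨c', hc', hc'eq⟩ := List.mem_map.mp hpam
      obtain ⟨y', hy', hy'eq⟩ := List.mem_map.mp hpbm
      have hpa2 : pa.2 = pm.getD c [] := by
        have h1 : c' = c := by rw [← hpa1', ← hc'eq]
        rw [← hc'eq]
        show pm.getD c' [] = pm.getD c []
        rw [h1]
      have hpb2 : pb.2 = pm.getD pb.1 [] := by
        rw [← hy'eq]
      rw [hpa2, hpmgetD] at hca
      rw [hpb2, hpmgetD] at hcb
      obtain ⟨hcams, hcapre⟩ := List.mem_filter.mp hca
      obtain ⟨hcbms, hcbpre⟩ := List.mem_filter.mp hcb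
      obtain ⟨kv, hkv, hkv1⟩ := hmskeys ca hcams
      refine ⟨kv, hkv, ?_, cb, ?_, ?_, ?_⟩
      · rw [hm2psome, hkv1]
        refine ⟨hcams, ?_⟩
        have h2 := hcapre; simp only [beq_iff_eq] at h2
        exact h2.symm
      · have hgd : (PySem.Dict.mk graph).getD ca [] = kv.2 := by
          rw [PySem.Dict.getD_eq_get?_getD, ← hkv1, hgget kv hkv]
          rfl
        rw [← hgd]
        exact List.contains_iff_mem.mp hcb2
      · rw [hm2psome]
        refine ⟨hcbms, ?_⟩
        have h2 := hcbpre; simp only [beq_iff_eq] at h2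
        rw [← hpb1]
        exact h2.symm
      · intro hq
        exact hnecy (by rw [hpa1', hpb1, hq])
    · rintro ⟨kv, hkv, hkvc, t, ht, htm, hyc⟩
      obtain ⟨hkvms, hkvpre⟩ := (hm2psome _ _).mp hkvc
      obtain ⟨htms, htpre⟩ := (hm2psome _ _).mp htm
      have hckeys : c ∈ pm.keys := by
        rw [hpmkeys]
        exact (PySem.Set.mem_ofList _ _).mpr (hkvpre ▸ List.mem_map_of_mem hkvms)
      have hykeys : y ∈ pm.keys := by
        rw [hpmkeys]
        exact (PySem.Set.mem_ofList _ _).mpr (htpre ▸ List.mem_map_of_mem htms)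
      refine ⟨(c, pm.getD c []), ?_, ?_⟩
      · rw [List.mem_filter]
        constructor
        · rw [hpmitems]; exact List.mem_map_of_mem hckeys
        · simp
      · rw [List.mem_map]
        refine ⟨(y, pm.getD y []), ?_, rfl⟩
        rw [List.mem_filter]
        refine ⟨by rw [hpmitems]; exact List.mem_map_of_mem hykeys, ?_⟩
        rw [Bool.and_eq_true]
        constructor
        · simp only [Bool.not_eq_true', beq_eq_false_iff_ne, ne_eq]
          exact fun hq => hyc hq.symm
        · unfold pvLinked
          rw [List.any_eq_true]
          refine ⟨kv.1, ?_, ?_⟩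
          · simp only []
            rw [hpmgetD, List.mem_filter]
            exact ⟨hkvms, by simp [hkvpre.symm]⟩
          · rw [List.any_eq_true]
            refine ⟨t, ?_, ?_⟩
            · simp only []
              rw [hpmgetD, List.mem_filter]
              exact ⟨htms, by simp [htpre.symm]⟩
            · have hgd : (PySem.Dict.mk graph).getD kv.1 [] = kv.2 := by
                rw [PySem.Dict.getD_eq_get?_getD, hgget kv hkv]
                rfl
              rw [hgd]
              exact List.contains_iff_mem.mpr ht
  -- final assembly
  have hfresh := PySem.Dict.items_foldl_insert_fresh
    (pm.items.foldl (fun eg pa =>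
      pm.items.foldl (fun eg pb => if pa.1 == pb.1 then eg
        else if pvLinked (PySem.Dict.mk graph) pa.2 pb.2 then eg.modify pa.1 [] (fun v => v ++ [pb.1]) else eg) eg) eg1).items
    Prod.fst
    (fun nv => PySem.List.sorted (PySem.Set.ofList (nv.2.filter (pvKeep k))) (fun x => x) false)
    PySem.Dict.empty
    (fun a _ => by rw [PySem.Dict.contains_empty])
    (by rw [show ∀ (d : PySem.Dict String (List String)), d.items.map Prod.fst = d.keys from fun _ => rfl]
        rw [hAkeys]; exact heg1nd)
  rw [show (PySem.Dict.empty : PySem.Dict String (List String)).items = [] from rfl] at hfresh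
  rw [List.nil_append] at hfresh
  rw [hfresh]
  have hnd2 : (pm.items.foldl (fun eg pa =>
      pm.items.foldl (fun eg pb => if pa.1 == pb.1 then eg
        else if pvLinked (PySem.Dict.mk graph) pa.2 pb.2 then eg.modify pa.1 [] (fun v => v ++ [pb.1]) else eg) eg) eg1).keys.Nodup := by
    rw [hAkeys]; exact heg1nd
  rw [PySem.Dict.items_eq_map_keys _ hnd2 []]
  rw [hAkeys, List.map_map]
  apply List.map_congr_left
  intro c hc
  simp only [Function.comp]
  congr 1
  apply PySem.List.sorted_eq_sorted_of_perm _ _ _ (fun a b hab => hab)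
  rw [List.perm_ext_iff_of_nodup (PySem.Set.nodup_ofList _) ((hBnodup c).filter _)]
  intro y
  rw [PySem.Set.mem_ofList _ _, List.mem_filter, List.mem_filter]
  have hA : y ∈ (pm.items.foldl (fun eg pa =>
      pm.items.foldl (fun eg pb => if pa.1 == pb.1 then eg
        else if pvLinked (PySem.Dict.mk graph) pa.2 pb.2 then eg.modify pa.1 [] (fun v => v ++ [pb.1]) else eg) eg) eg1).getD c []
      ↔ y ∈ eg1.getD c [] ∨ ∃ kv ∈ graph, m2p.get? kv.1 = some c ∧ ∃ t ∈ kv.2, m2p.get? t = some y ∧ y ≠ c := by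
    rw [hAgetD c, List.mem_append, hcrux c y]
  have hB : y ∈ (graph.foldl (fun nbrs kv => match m2p.get? kv.1 with
        | none => nbrs
        | some pa => kv.2.foldl (fun nbrs t => match m2p.get? t with
            | none => nbrs
            | some pb => if pb ≠ pa then nbrs.modify pa PySem.Set.empty (fun s => PySem.Set.add s pb) else nbrs) nbrs) eg1).getD c PySem.Set.empty
      ↔ y ∈ eg1.getD c [] ∨ ∃ kv ∈ graph, m2p.get? kv.1 = some c ∧ ∃ t ∈ kv.2, m2p.get? t = some y ∧ y ≠ c := by
    exact hBmem c y
  constructor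
  · rintro ⟨hy, hk⟩
    exact ⟨hB.mpr (hA.mp hy), hk⟩
  · rintro ⟨hy, hk⟩
    exact ⟨hA.mpr (hB.mp hy), hk⟩

-- ===== VERDICT (by name: the statement is the Claim_ definition above) =====
theorem enrich_graph_with_prefixes_spec : Claim_equal_enrich_graph_with_prefixes := by
  intro graph k _hdom hpre
  unfold Spec_enrich_graph_with_prefixes
  rw [A_eq_mid, B_eq_mid, mid_eq graph k hpre]
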